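-- pv_equiv track=rewrite | github.com/zacheen/python | question_practice/leetcode/Contest result/Weekly Contest 460/4_3630. Partition Array for Maximum XOR and AND/A.py | maximizeXorAndXor
-- ===== SOURCE A (Python) =====
-- from typing import List
--
-- class XorBasis:
--     def __init__(self, n: int):
--         self.b = [0] * (n.bit_length() + 1)
--         # b[i] : 最高位i 代表的基
--
--     def insert(self, x: int) -> None: # 回傳是否為新的項目
--         b = self.b
--         while x:
--             i = x.bit_length()  # x 的最高位
--             if b[i] == 0:       # x 和之前的基是線性無關的
--                 b[i] = x        # 新增一個基，最高位為 i
--                 return True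
--             x ^= b[i]           # 確保參與 max_xor 的基的最高位是互不相同的，方便我們貪心
--
--         # 正常循環結束，此時 x=0，說明一開始的 x 可以被已有基表出，不是一個線性無關基
--         return False
--
--     def max_xor(self) -> int:
--         res = 0
--         # 從高到低貪心：越高的位，越必須是 1
--         # 由於每個位的基至多一個，所以每個位只需考慮異或一個基，若能變大，則異或之
--         for base_n in self.b[::-1]:
--             if (new_res := res ^ base_n) > res:
--                 res = new_res
--         return res
--
-- def maximizeXorAndXor(nums: List[int]) -> int:
--     n = len(nums)
--     max_n = max(nums)
--
--     u = 1 << n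
--     sub_and = [0] * u
--     sub_xor = [0] * u
--     sub_and[0] = -1
--     for i, x in enumerate(nums):
--         high_bit = 1 << i
--         for mask in range(high_bit):
--             sub_and[high_bit | mask] = sub_and[mask] & x
--             sub_xor[high_bit | mask] = sub_xor[mask] ^ x
--     sub_and[0] = 0
--
--     def max_xor2(sub: int) -> int:
--         b = XorBasis(max_n)
--         xor = sub_xor[sub]
--         for i, x in enumerate(nums):
--             if sub >> i & 1:
--                 b.insert(x & ~xor)
--         return xor + b.max_xor() * 2
--
--     return max(sub_and[i] + max_xor2((u - 1) ^ i) for i in range(u))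
-- ===== SOURCE B (Python) =====
-- from typing import List
--
-- def _basis_insert(b: List[int], x: int) -> None:
--     if x == 0:
--         return
--     i = x.bit_length()
--     if b[i] == 0:
--         b[i] = x
--     else:
--         _basis_insert(b, x ^ b[i])
--
-- def maximizeXorAndXor(nums: List[int]) -> int:
--     # No precomputed subset tables: for each split, fold the AND-subset and the
--     # XOR-subset directly, then greedily maximize the doubled free part via a basis.
--     n = len(nums)
--     u = 1 << n
--     blen = max(nums).bit_length() + 1
--     best = None
--     for i in range(u):
--         c = (u - 1) ^ i
--         if i == 0:
--             and_val = 0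
--         else:
--             and_val = -1
--             for j, x in enumerate(nums):
--                 if i >> j & 1:
--                     and_val &= x
--         xor = 0
--         for j, x in enumerate(nums):
--             if c >> j & 1:
--                 xor ^= x
--         b = [0] * blen
--         for j, x in enumerate(nums):
--             if c >> j & 1:
--                 _basis_insert(b, x & ~xor)
--         mx = 0
--         for v in reversed(b):
--             if (new_mx := mx ^ v) > mx:
--                 mx = new_mx
--         total = and_val + xor + 2 * mx
--         if best is None or total > best:
--             best = total
--     return best
-- ===== Notes on version B (the rewrite author's own statement) =====
-- stated objective: simpler
-- what changed: Drops A's two precomputed size-2^n DP tables (sub_and/sub_xor) and the XorBasis class: for each split i the AND and XOR of the two complementary subsets are folded directly from the set bits, with a plain recursive basis insert and a running maximum instead of max over a generator.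
-- outside the precondition, e.g. on maximizeXorAndXor([-10, -17, 27]): A returns 52, B returns 52; on maximizeXorAndXor([-1, -2]): A raises IndexError, B raises IndexError
import Mathlib
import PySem

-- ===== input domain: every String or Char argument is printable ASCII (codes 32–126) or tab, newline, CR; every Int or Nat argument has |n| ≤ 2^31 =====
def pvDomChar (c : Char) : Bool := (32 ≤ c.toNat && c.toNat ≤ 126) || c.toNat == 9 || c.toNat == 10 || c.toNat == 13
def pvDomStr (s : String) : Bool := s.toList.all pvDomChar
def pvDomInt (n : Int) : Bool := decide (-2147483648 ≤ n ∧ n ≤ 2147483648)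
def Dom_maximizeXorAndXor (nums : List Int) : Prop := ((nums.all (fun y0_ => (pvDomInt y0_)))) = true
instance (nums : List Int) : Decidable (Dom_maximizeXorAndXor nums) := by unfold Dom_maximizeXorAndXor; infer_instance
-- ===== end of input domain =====

-- B drops A's two precomputed 2^n-sized DP tables and the XorBasis class: each split folds its
-- AND- and XOR-subset directly and keeps a running maximum.  Same asymptotic cost ("simpler").

-- ===== PORT A =====
-- XorBasis.insert: the `while x:` loop as fuel recursion; on inputs admitted by Pre_ every
-- iteration strictly decreases x.bit_length(), so fuel b.length+1 is never exhausted.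
def xbInsertA (b : List Int) (x : Int) : Nat → List Int
  | 0 => b
  | fuel+1 =>
    if x = 0 then b
    else
      match PySem.List.pyGet? b ((PySem.Int.bitLength x : Nat) : Int) with
      | none => b          -- Python raises IndexError here (outside Pre_)
      | some bi =>
        if bi = 0 then b.set (PySem.Int.bitLength x) x
        else xbInsertA b (PySem.Int.bxor x bi) fuel

-- XorBasis.max_xor: b[::-1] is slice with step -1 (never raises); walrus branch kept in order
def xbMaxXorA (b : List Int) : Int :=
  ((PySem.List.slice? b none none (-1)).getD []).foldl
    (fun res bn => if PySem.Int.bxor res bn > res then PySem.Int.bxor res bn else res) 0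

-- inner def max_xor2 (closure arguments nums, max_n, sub_xor passed explicitly)
def maxXor2A (nums : List Int) (maxN : Int) (subXor : List Int) (sub : Int) : Int :=
  let b0 : List Int := List.replicate (PySem.Int.bitLength maxN + 1) 0
  let xor := PySem.List.pyGetD subXor sub 0     -- sub_xor[sub], always in range
  let b := (PySem.List.enumerate nums 0).foldl
    (fun b jx => if PySem.Int.band (sub >>> jx.1.toNat) 1 ≠ 0
                 then xbInsertA b (PySem.Int.band jx.2 (Int.not xor)) (b.length + 1) else b) b0
  xor + xbMaxXorA b * 2

def maximizeXorAndXor (nums : List Int) : Int :=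
  let n := nums.length
  match PySem.List.max? nums (fun x => x) with
  | none => 0               -- Python: max([]) raises ValueError (excluded by Pre_)
  | some maxN =>
    let u : Nat := 1 <<< n
    let init : List Int × List Int := ((List.replicate u (0:Int)).set 0 (-1), List.replicate u (0:Int))
    let st := (PySem.List.enumerate nums 0).foldl
      (fun st jx =>
        (PySem.List.pyRange 0 ((1 <<< jx.1.toNat : Nat) : Int) 1).foldl
          (fun st mask =>
            (st.1.set (PySem.Int.bor ((1 <<< jx.1.toNat : Nat) : Int) mask).toNat
               (PySem.Int.band (PySem.List.pyGetD st.1 mask 0) jx.2),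
             st.2.set (PySem.Int.bor ((1 <<< jx.1.toNat : Nat) : Int) mask).toNat
               (PySem.Int.bxor (PySem.List.pyGetD st.2 mask 0) jx.2))) st)
      init
    let subAnd := st.1.set 0 0
    let subXor := st.2
    (PySem.List.max? ((PySem.List.pyRange 0 (u : Int) 1).map
        (fun i => PySem.List.pyGetD subAnd i 0 + maxXor2A nums maxN subXor (PySem.Int.bxor ((u : Int) - 1) i)))
      (fun x => x)).getD 0  -- range(u) is nonempty (u ≥ 1), so this max never raises

-- ===== PORT B =====
-- recursive _basis_insert; same fuel bound as the A-side loop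
def xbInsertB (b : List Int) (x : Int) : Nat → List Int
  | 0 => b
  | fuel+1 =>
    if x = 0 then b
    else
      match PySem.List.pyGet? b ((PySem.Int.bitLength x : Nat) : Int) with
      | none => b          -- Python raises IndexError here (outside Pre_)
      | some bi =>
        if bi = 0 then b.set (PySem.Int.bitLength x) x
        else xbInsertB b (PySem.Int.bxor x bi) fuel

def maximizeXorAndXor_alt (nums : List Int) : Int :=
  let n := nums.length
  let u : Nat := 1 <<< n
  match PySem.List.max? nums (fun x => x) with
  | none => 0               -- Python: max([]) raises ValueError (excluded by Pre_)
  | some m =>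
    let blen := PySem.Int.bitLength m + 1
    let best := (PySem.List.pyRange 0 (u : Int) 1).foldl
      (fun (best : Option Int) i =>
        let c := PySem.Int.bxor ((u : Int) - 1) i
        let andVal : Int :=
          if i = 0 then 0
          else (PySem.List.enumerate nums 0).foldl
            (fun a jx => if PySem.Int.band (i >>> jx.1.toNat) 1 ≠ 0 then PySem.Int.band a jx.2 else a) (-1)
        let xor : Int := (PySem.List.enumerate nums 0).foldl
            (fun a jx => if PySem.Int.band (c >>> jx.1.toNat) 1 ≠ 0 then PySem.Int.bxor a jx.2 else a) 0
        let b := (PySem.List.enumerate nums 0).foldl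
            (fun b jx => if PySem.Int.band (c >>> jx.1.toNat) 1 ≠ 0
                         then xbInsertB b (PySem.Int.band jx.2 (Int.not xor)) (b.length + 1) else b)
            (List.replicate blen (0:Int))
        let mx := b.reverse.foldl (fun mx v => if PySem.Int.bxor mx v > mx then PySem.Int.bxor mx v else mx) 0
        let total := andVal + xor + 2 * mx
        match best with
        | none => some total
        | some bv => if total > bv then some total else some bv)
      none
    best.getD 0             -- u ≥ 1, so the loop ran at least once and best is never none

-- ===== PRECONDITION & SPEC =====
-- Pre_ excludes the empty list (max([]) raises ValueError) and lists with two or more negative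
-- elements: there some subset has an even number of negatives, its complement-masked values fed
-- to XorBasis.insert are negative, and A then raises IndexError or loops forever on many such
-- lists (returning only accidentally on the rest, with no closed-form description of which).
def Pre_maximizeXorAndXor (nums : List Int) : Prop :=
  nums ≠ [] ∧ nums.countP (fun x => decide (x < 0)) ≤ 1
instance (nums : List Int) : Decidable (Pre_maximizeXorAndXor nums) := by
  unfold Pre_maximizeXorAndXor; infer_instance

def pvWitness_maximizeXorAndXor : List Int := [3, 1, -2]

def Spec_maximizeXorAndXor (nums : List Int) (out : Int) : Prop := out = maximizeXorAndXor_alt nums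
instance (nums : List Int) (out : Int) : Decidable (Spec_maximizeXorAndXor nums out) := by
  unfold Spec_maximizeXorAndXor; infer_instance

-- ===== CLAIM (what is proved, stated in full; the proofs are below) =====
def Claim_equal_maximizeXorAndXor : Prop := ∀ (nums : List Int), Dom_maximizeXorAndXor nums → Pre_maximizeXorAndXor nums → Spec_maximizeXorAndXor nums (maximizeXorAndXor nums)

-- ===== LEMMAS AND PROOFS =====

-- the two insert routines compute the same list
theorem xbInsert_eq (fuel : Nat) : ∀ (b : List Int) (x : Int), xbInsertB b x fuel = xbInsertA b x fuel := by
  induction fuel with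
  | zero => intro b x; rfl
  | succ fuel ih =>
    intro b x
    simp only [xbInsertA, xbInsertB]
    split
    · rfl
    · cases PySem.List.pyGet? b ((PySem.Int.bitLength x : Nat) : Int) with
      | none => rfl
      | some bi =>
        simp only
        split
        · rfl
        · exact ih ..

theorem shiftL_one (n : Nat) : (1 : Nat) <<< n = 2^n := by simp [Nat.shiftLeft_eq]

theorem lor_two_pow_add (k : Nat) : ∀ m, m < 2^k → (2^k) ||| m = 2^k + m := by
  induction k with
  | zero => intro m h; interval_cases m; rfl
  | succ k ih =>
    intro m h
    have hp : (2:Nat)^(k+1) = 2^k * 2 := Nat.pow_succ 2 k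
    have h2 : m / 2 < 2^k := by omega
    have key : (2^(k+1) ||| m) / 2 = 2^k + m/2 := by
      rw [Nat.or_div_two]
      have e : 2^(k+1)/2 = 2^k := by omega
      rw [e, ih _ h2]
    have par : (2^(k+1) ||| m) % 2 = m % 2 := by
      have t : (2^(k+1) ||| m) &&& 1 = (2^(k+1) &&& 1) ||| (m &&& 1) :=
        Nat.and_or_distrib_right _ _ 1
      rw [Nat.and_one_is_mod, Nat.and_one_is_mod, Nat.and_one_is_mod] at t
      have e1 : (2^(k+1)) % 2 = 0 := by omega
      rw [e1, Nat.zero_or] at t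
      exact t
    have := Nat.div_add_mod (2^(k+1) ||| m) 2
    omega

-- spec-side: fold op over the elements of l sitting at set bits of the mask m, in index order
def selFold (op : Int → Int → Int) : List Int → Nat → Int → Int
  | [], _, acc => acc
  | x :: t, m, acc => selFold op t (m / 2) (if m % 2 = 1 then op acc x else acc)

theorem selFold_append (op : Int → Int → Int) (x : Int) :
    ∀ (l : List Int) (m : Nat) (acc : Int),
    selFold op (l ++ [x]) m acc =
      if (m / 2^l.length) % 2 = 1 then op (selFold op l m acc) x else selFold op l m acc := by
  intro l
  induction l with
  | nil => intro m acc; simp [selFold]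
  | cons y t ih =>
    intro m acc
    simp only [List.cons_append, selFold, ih, List.length_cons]
    rw [Nat.div_div_eq_div_mul, show 2 * 2^t.length = 2^(t.length+1) by rw [pow_succ, Nat.mul_comm]]

theorem selFold_high (op : Int → Int → Int) :
    ∀ (l : List Int) (k m : Nat) (acc : Int), l.length ≤ k →
    selFold op l (2^k + m) acc = selFold op l m acc := by
  intro l
  induction l with
  | nil => intros; rfl
  | cons y t ih =>
    intro k m acc h
    simp only [List.length_cons] at h
    have hpow : (2:Nat)^k = 2 * 2^(k-1) := by
      conv_lhs => rw [show k = (k-1)+1 by omega]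
      ring
    have h1 : (2^k + m) % 2 = m % 2 := by omega
    have h2 : (2^k + m) / 2 = 2^(k-1) + m/2 := by omega
    simp only [selFold, h1, h2]
    exact ih (k-1) (m/2) _ (by omega)

-- the port-side bit test, reduced to arithmetic on a Nat mask
theorem band_shift_test (m s : Nat) :
    (PySem.Int.band ((m : Int) >>> ((s : Nat) : Int)) 1 ≠ 0) ↔ ((m >>> s) % 2 = 1) := by
  rw [Int.shiftRight_natCast]
  have hb := PySem.Int.band_natCast (m >>> s) 1
  simp only [Nat.cast_one] at hb
  rw [hb, Nat.and_one_is_mod]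
  simp only [ne_eq, Nat.cast_eq_zero]
  omega

-- B's enumerate loops compute selFold
theorem selFold_enum (op : Int → Int → Int) :
    ∀ (nums : List Int) (s m : Nat) (acc : Int),
    (PySem.List.enumerate nums (s : Int)).foldl
      (fun a jx => if PySem.Int.band ((m : Int) >>> jx.1.toNat) 1 ≠ 0 then op a jx.2 else a) acc
    = selFold op nums (m >>> s) acc := by
  intro nums
  induction nums with
  | nil => intros; rfl
  | cons y t ih =>
    intro s m acc
    have hcons : PySem.List.enumerate (y::t) (s:Int) = ((s:Int),y) :: PySem.List.enumerate t ((s:Int)+1) := by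
      simp [PySem.List.enumerate]
    rw [hcons]
    simp only [List.foldl_cons, Int.toNat_natCast]
    simp only [band_shift_test m s]
    have h1 : ((s:Int)+1) = ((s+1 : Nat) : Int) := by push_cast; ring
    rw [h1, ih (s+1) m _]
    simp only [selFold]
    have e1 : m >>> (s+1) = (m >>> s) / 2 := by
      rw [Nat.shiftRight_succ]
    rw [e1]

theorem selFold_enum0 (op : Int → Int → Int) (nums : List Int) (m : Nat) (acc : Int) :
    (PySem.List.enumerate nums 0).foldl
      (fun a jx => if PySem.Int.band ((m : Int) >>> jx.1.toNat) 1 ≠ 0 then op a jx.2 else a) acc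
    = selFold op nums m acc := by
  have h := selFold_enum op nums 0 m acc
  simpa using h

-- one doubling pass of A's table loop
theorem innerLoop (h : Nat) (f : Int → Int) :
    ∀ (ms : List Nat) (arr : List Int), (∀ m ∈ ms, m < h) → 2*h ≤ arr.length →
    (ms.foldl (fun st m => st.set (h + m) (f (st.getD m 0))) arr).length = arr.length ∧
    ∀ j : Nat, (ms.foldl (fun st m => st.set (h + m) (f (st.getD m 0))) arr).getD j 0
      = if h ≤ j ∧ j - h ∈ ms then f (arr.getD (j - h) 0) else arr.getD j 0 := by
  intro ms
  induction ms with
  | nil =>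
    intro arr _ _
    exact ⟨rfl, fun j => by simp⟩
  | cons m0 rest ih =>
    intro arr hlt hlen
    have hm0 : m0 < h := hlt m0 (by simp)
    simp only [List.foldl_cons]
    set arr' := arr.set (h + m0) (f (arr.getD m0 0)) with harr'
    have hlen' : arr'.length = arr.length := by simp [harr']
    obtain ⟨ihlen, ihget⟩ := ih arr' (fun m hm => hlt m (by simp [hm])) (by omega)
    refine ⟨by rw [ihlen, hlen'], fun j => ?_⟩
    rw [ihget j]
    by_cases hj : h ≤ j
    · by_cases hrest : j - h ∈ rest
      · have hjh : j - h < h := hlt (j-h) (List.mem_cons_of_mem _ hrest)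
        rw [if_pos ⟨hj, hrest⟩, if_pos ⟨hj, List.mem_cons_of_mem _ hrest⟩]
        congr 1
        simp [harr', List.getD, List.getElem?_set_ne (show h + m0 ≠ j - h by omega)]
      · by_cases he : j = h + m0
        · have hjm : j - h = m0 := by omega
          rw [if_neg (by tauto), if_pos ⟨hj, by simp [hjm]⟩, hjm]
          subst he
          simp [harr', List.getD, show h + m0 < arr.length by omega]
        · have hnm : j - h ∉ (m0 :: rest) := by
            intro hc
            rcases List.mem_cons.mp hc with hq | hq
            · omega
            · exact hrest hq
          rw [if_neg (by tauto), if_neg (by tauto)]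
          simp [harr', List.getD, List.getElem?_set_ne (show h + m0 ≠ j by omega)]
    · rw [if_neg (by tauto), if_neg (by tauto)]
      simp [harr', List.getD, List.getElem?_set_ne (show h + m0 ≠ j by omega)]

-- A's full table-building fold, one component at a time
theorem tableCorrect (op : Int → Int → Int) (init : Int) :
    ∀ (pre : List Int) (u : Nat) (arr : List Int),
    arr.length = u → 2^pre.length ≤ u →
    (∀ j : Nat, arr.getD j 0 = if j = 0 then init else 0) →
    (((PySem.List.enumerate pre 0).foldl
       (fun st jx =>
         (PySem.List.pyRange 0 ((1 <<< jx.1.toNat : Nat) : Int) 1).foldl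
           (fun st mask =>
             st.set (PySem.Int.bor ((1 <<< jx.1.toNat : Nat) : Int) mask).toNat
               (op (PySem.List.pyGetD st mask 0) jx.2)) st) arr).length = u ∧
     ∀ j : Nat, ((PySem.List.enumerate pre 0).foldl
       (fun st jx =>
         (PySem.List.pyRange 0 ((1 <<< jx.1.toNat : Nat) : Int) 1).foldl
           (fun st mask =>
             st.set (PySem.Int.bor ((1 <<< jx.1.toNat : Nat) : Int) mask).toNat
               (op (PySem.List.pyGetD st mask 0) jx.2)) st) arr).getD j 0
       = if j < 2^pre.length then selFold op pre j init else 0) := by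
  intro pre
  induction pre using List.reverseRecOn with
  | nil =>
    intro u arr hlen _ hbase
    refine ⟨hlen, fun j => ?_⟩
    simp only [PySem.List.enumerate, List.foldl_nil, List.length_nil, pow_zero]
    rw [hbase j]
    by_cases hj : j = 0
    · simp [hj, selFold]
    · rw [if_neg hj, if_neg (by omega)]
  | append_singleton l x ih =>
    intro u arr hlen hu hbase
    have hlapp : (l ++ [x]).length = l.length + 1 := by simp
    have hpow2 : (2:Nat)^(l.length+1) = 2*2^l.length := by ring
    rw [hlapp] at hu
    simp only [hlapp]
    have hu' : 2^l.length ≤ u := by omega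
    obtain ⟨ihlen, ihget⟩ := ih u arr hlen hu' hbase
    rw [PySem.List.enumerate_append, List.foldl_append]
    set mid := (PySem.List.enumerate l 0).foldl _ arr with hmid
    have hmidlen : mid.length = u := ihlen
    have hone : PySem.List.enumerate [x] (0 + (l.length : Int)) = [(((l.length:Nat):Int), x)] := by
      simp [PySem.List.enumerate]
    rw [hone]
    simp only [List.foldl_cons, List.foldl_nil, Int.toNat_natCast]
    set h := (1:Nat) <<< l.length with hh
    have hpow : h = 2^l.length := shiftL_one l.length
    rw [PySem.List.pyRange_zero_nat h, List.foldl_map]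
    have hcong : (List.range h).foldl
        (fun st (k:Nat) => st.set (PySem.Int.bor ((h:Nat):Int) ((k:Nat):Int)).toNat
          (op (PySem.List.pyGetD st ((k:Nat):Int) 0) x)) mid
      = (List.range h).foldl (fun st k => st.set (h + k) ((fun v => op v x) (st.getD k 0))) mid := by
      apply PySem.List.foldl_congr_mem
      intro st k hk
      have hklt : k < h := List.mem_range.mp hk
      rw [PySem.Int.bor_natCast, PySem.List.pyGetD_natCast]
      rw [hpow] at hklt ⊢
      rw [lor_two_pow_add _ _ hklt, Int.toNat_natCast]
    rw [hcong]
    obtain ⟨illen, ilget⟩ := innerLoop h (fun v => op v x) (List.range h) mid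
      (fun m hm => List.mem_range.mp hm)
      (by omega)
    refine ⟨by rw [illen, hmidlen], fun j => ?_⟩
    rw [ilget j]
    simp only [List.mem_range]
    by_cases hj1 : j < h
    · rw [if_neg (by omega), ihget j, if_pos (by omega), if_pos (by omega)]
      rw [selFold_append]
      rw [if_neg (by rw [Nat.div_eq_of_lt (by omega)]; omega)]
    · by_cases hj2 : j < 2*h
      · rw [if_pos ⟨by omega, by omega⟩, ihget (j-h), if_pos (by omega), if_pos (by omega)]
        rw [selFold_append]
        have hdiv : j / 2^l.length = 1 := Nat.div_eq_of_lt_le (by omega) (by omega)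
        rw [if_pos (by rw [hdiv])]
        have heq : selFold op l j init = selFold op l (j - h) init := by
          conv_lhs => rw [show j = 2^l.length + (j - h) by omega]
          exact selFold_high op l l.length (j-h) init le_rfl
        rw [heq]
      · rw [if_neg (by omega), ihget j, if_neg (by omega), if_neg (by omega)]

-- the A-side pair-state fold splits into two independent folds
theorem tableSplit : ∀ (L : List (Int × Int)) (a0 b0 : List Int),
    L.foldl
      (fun (st : List Int × List Int) jx =>
        (PySem.List.pyRange 0 ((1 <<< jx.1.toNat : Nat) : Int) 1).foldl
          (fun st mask =>
            (st.1.set (PySem.Int.bor ((1 <<< jx.1.toNat : Nat) : Int) mask).toNat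
               (PySem.Int.band (PySem.List.pyGetD st.1 mask 0) jx.2),
             st.2.set (PySem.Int.bor ((1 <<< jx.1.toNat : Nat) : Int) mask).toNat
               (PySem.Int.bxor (PySem.List.pyGetD st.2 mask 0) jx.2))) st)
      (a0, b0)
    = (L.foldl
        (fun st jx =>
          (PySem.List.pyRange 0 ((1 <<< jx.1.toNat : Nat) : Int) 1).foldl
            (fun st mask =>
              st.set (PySem.Int.bor ((1 <<< jx.1.toNat : Nat) : Int) mask).toNat
                (PySem.Int.band (PySem.List.pyGetD st mask 0) jx.2)) st) a0,
       L.foldl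
        (fun st jx =>
          (PySem.List.pyRange 0 ((1 <<< jx.1.toNat : Nat) : Int) 1).foldl
            (fun st mask =>
              st.set (PySem.Int.bor ((1 <<< jx.1.toNat : Nat) : Int) mask).toNat
                (PySem.Int.bxor (PySem.List.pyGetD st mask 0) jx.2)) st) b0) := by
  intro L
  induction L with
  | nil => intro a0 b0; rfl
  | cons jx rest ih =>
    intro a0 b0
    simp only [List.foldl_cons]
    rw [PySem.List.foldl_prod_mk
      (fun (st : List Int) mask =>
        st.set (PySem.Int.bor ((1 <<< jx.1.toNat : Nat) : Int) mask).toNat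
          (PySem.Int.band (PySem.List.pyGetD st mask 0) jx.2))
      (fun (st : List Int) mask =>
        st.set (PySem.Int.bor ((1 <<< jx.1.toNat : Nat) : Int) mask).toNat
          (PySem.Int.bxor (PySem.List.pyGetD st mask 0) jx.2))
      (PySem.List.pyRange 0 ((1 <<< jx.1.toNat : Nat) : Int) 1) a0 b0]
    exact ih _ _

-- the initial arrays, characterised entry-wise
theorem baseChar (u : Nat) (init : Int) (hu : 1 ≤ u) (j : Nat) :
    ((List.replicate u (0:Int)).set 0 init).getD j 0 = if j = 0 then init else 0 := by
  by_cases hj : j = 0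
  · subst hj
    simp [List.getD, show 0 < u from hu]
  · rw [if_neg hj]
    rcases Nat.lt_or_ge j u with hlt | hge
    · rw [List.getD, List.getElem?_set_ne (Ne.symm hj)]
      simp [hlt]
    · rw [List.getD, List.getElem?_set_ne (Ne.symm hj)]
      rw [List.getElem?_eq_none (by simpa using hge)]
      rfl


theorem baseChar0 (u : Nat) (j : Nat) :
    (List.replicate u (0:Int)).getD j 0 = if j = 0 then (0:Int) else 0 := by
  rcases Nat.lt_or_ge j u with hlt | hge
  · simp [List.getD, hlt]
  · rw [List.getD, List.getElem?_eq_none (by simpa using hge)]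
    simp

-- the final stage: max over the mapped range vs the running Option-maximum
theorem optionMax (g : Int → Int) :
    ∀ (l : List Int) (x : Int),
    l.foldl (fun (best : Option Int) i =>
        match best with
        | none => some (g i)
        | some bv => if g i > bv then some (g i) else some bv) (some x)
    = some (l.foldl (fun bv i => if g i > bv then g i else bv) x) := by
  intro l
  induction l with
  | nil => intro x; rfl
  | cons y t ih =>
    intro x
    simp only [List.foldl_cons]
    by_cases hp : g y > x <;> simp [hp, ih]

theorem foldMax_eq (f g : Int → Int) (u : Nat) (hu : 0 < u)
    (h : ∀ i : Int, 0 ≤ i → i < (u:Int) → f i = g i) :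
    (PySem.List.max? ((PySem.List.pyRange 0 (u:Int) 1).map f) (fun x => x)).getD 0
    = ((PySem.List.pyRange 0 (u:Int) 1).foldl (fun (best : Option Int) i =>
        match best with
        | none => some (g i)
        | some bv => if g i > bv then some (g i) else some bv) none).getD 0 := by
  rw [PySem.List.pyRange_one_cons (by exact_mod_cast hu)]
  rw [List.map_cons, PySem.List.max?_id_cons, List.foldl_cons]
  show _ = ((PySem.List.pyRange (0+1) (u:Int) 1).foldl _ (some (g 0))).getD 0
  rw [optionMax, Option.getD_some, Option.getD_some, List.foldl_map]
  rw [h 0 le_rfl (by exact_mod_cast hu)]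
  apply PySem.List.foldl_congr_mem
  intro acc i hi
  have hmem := (PySem.List.mem_pyRange_one).mp hi
  rw [h i (by omega) (by omega)]
  rw [max_def]
  split_ifs <;> omega

-- ===== VERDICT (by name: the statement is the Claim_ definition above) =====
theorem maximizeXorAndXor_spec : Claim_equal_maximizeXorAndXor := by
  intro nums _ hpre
  obtain ⟨hne, -⟩ := hpre
  unfold Spec_maximizeXorAndXor
  rcases hmax : PySem.List.max? nums (fun x => x) with _ | maxN
  · exact absurd (by rwa [PySem.List.max?_eq_none_iff] at hmax) hne
  simp only [maximizeXorAndXor, maximizeXorAndXor_alt, hmax]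
  simp only [tableSplit]
  set tA := (PySem.List.enumerate nums 0).foldl
      (fun st jx =>
        (PySem.List.pyRange 0 ((1 <<< jx.1.toNat : Nat) : Int) 1).foldl
          (fun st mask =>
            st.set (PySem.Int.bor ((1 <<< jx.1.toNat : Nat) : Int) mask).toNat
              (PySem.Int.band (PySem.List.pyGetD st mask 0) jx.2)) st)
      ((List.replicate (1 <<< nums.length) (0:Int)).set 0 (-1)) with htAdef
  set tX := (PySem.List.enumerate nums 0).foldl
      (fun st jx =>
        (PySem.List.pyRange 0 ((1 <<< jx.1.toNat : Nat) : Int) 1).foldl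
          (fun st mask =>
            st.set (PySem.Int.bor ((1 <<< jx.1.toNat : Nat) : Int) mask).toNat
              (PySem.Int.bxor (PySem.List.pyGetD st mask 0) jx.2)) st)
      (List.replicate (1 <<< nums.length) (0:Int)) with htXdef
  have hn1 : (1:Nat) ≤ 2^nums.length := Nat.one_le_two_pow
  obtain ⟨hlenA, hgetA⟩ := tableCorrect PySem.Int.band (-1) nums (2^nums.length)
    ((List.replicate (1 <<< nums.length) (0:Int)).set 0 (-1))
    (by simp [shiftL_one]) (le_refl _) (baseChar _ _ (by simpa [shiftL_one] using hn1))
  obtain ⟨hlenX, hgetX⟩ := tableCorrect PySem.Int.bxor 0 nums (2^nums.length)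
    (List.replicate (1 <<< nums.length) (0:Int))
    (by simp [shiftL_one]) (le_refl _) (baseChar0 _)
  rw [← htAdef] at hlenA hgetA
  rw [← htXdef] at hlenX hgetX
  clear htAdef htXdef
  simp only [shiftL_one]
  refine foldMax_eq _ _ (2^nums.length) (by positivity) ?_
  intro i h0 hi
  have hi' : i = ((i.toNat : Nat) : Int) := (Int.toNat_of_nonneg h0).symm
  have hitn : i.toNat < 2^nums.length := by omega
  have husub : ((2^nums.length : Nat) : Int) - 1 = (((2^nums.length - 1 : Nat)) : Int) := by omega
  have hsub : PySem.Int.bxor (((2^nums.length : Nat) : Int) - 1) i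
      = ((((2^nums.length - 1) ^^^ i.toNat : Nat)) : Int) := by
    rw [husub]
    conv_lhs => rw [hi']
    exact PySem.Int.bxor_natCast _ _
  rw [hsub]
  have hslt : (2^nums.length - 1) ^^^ i.toNat < 2^nums.length :=
    Nat.xor_lt_two_pow (by omega) hitn
  simp only [maxXor2A, xbMaxXorA, PySem.List.slice?_none_none_neg_one, Option.getD_some]
  rw [PySem.List.pyGetD_natCast tX]
  rw [hgetX, if_pos hslt]
  rw [selFold_enum0 PySem.Int.bxor nums ((2^nums.length - 1) ^^^ i.toNat)]
  simp only [xbInsert_eq]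
  conv_lhs => rw [hi']
  conv_rhs => rw [hi']
  simp only [Int.toNat_natCast]
  rw [PySem.List.pyGetD_natCast (tA.set 0 0)]
  have hAnd : (tA.set 0 0).getD i.toNat 0
      = if i.toNat = 0 then 0 else selFold PySem.Int.band nums i.toNat (-1) := by
    by_cases hz : i.toNat = 0
    · rw [if_pos hz, hz]
      simp [List.getD, show 0 < tA.length by omega]
    · rw [if_neg hz]
      have hstep : (tA.set 0 0).getD i.toNat 0 = tA.getD i.toNat 0 := by
        simp [List.getD, List.getElem?_set_ne (show (0:Nat) ≠ i.toNat from fun hc => hz hc.symm)]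
      rw [hstep, hgetA, if_pos hitn]
  rw [hAnd]
  have hif : ((((i.toNat : Nat)) : Int) = 0) ↔ (i.toNat = 0) := by omega
  simp only [hif]
  rw [selFold_enum0 PySem.Int.band nums i.toNat]
  ring
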